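-- pv_equiv track=rewrite | github.com/oneonlee/Problem-Solving | 프로그래머스/lv1/42840. 모의고사/모의고사.py | solution
-- ===== SOURCE A (Python) =====
-- import math # 올림을 하기 위해 사용
--
-- def solution(answers):
--     number_of_questions = len(answers) # 주어진 문제의 개수
--
--     # 문제 수보다 넉넉하게 losers의 답들의 list를 만듬
--     loser_1 = [1, 2, 3, 4, 5] * math.ceil(number_of_questions/5)
--     loser_2 = [2, 1, 2, 3, 2, 4, 2, 5] * math.ceil(number_of_questions/8)
--     loser_3 = [3, 3, 1, 1, 2, 2, 4, 4, 5, 5] * math.ceil(number_of_questions/10)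
--
--     score_of_loser_1 = 0
--     score_of_loser_2 = 0
--     score_of_loser_3 = 0
--
--     for question_num in range(0, number_of_questions):
--         if (loser_1[question_num] == answers[question_num]):
--             score_of_loser_1 += 1
--         if (loser_2[question_num] == answers[question_num]):
--             score_of_loser_2 += 1
--         if (loser_3[question_num] == answers[question_num]):
--             score_of_loser_3 += 1
--
--     losers_score = [score_of_loser_1, score_of_loser_2, score_of_loser_3]
--     highest_score = max(losers_score)
--
--     winner_of_losers = []
--     if(score_of_loser_1 == highest_score):
--         winner_of_losers.append(1)
--     if(score_of_loser_2 == highest_score):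
--         winner_of_losers.append(2)
--     if(score_of_loser_3 == highest_score):
--         winner_of_losers.append(3)
--
--     return winner_of_losers
-- ===== SOURCE B (Python) =====
-- def solution(answers):
--     pats = [[1, 2, 3, 4, 5], [2, 1, 2, 3, 2, 4, 2, 5], [3, 3, 1, 1, 2, 2, 4, 4, 5, 5]]
--     # Histogram: one pass over answers bucketing by (position mod 40, answer value);
--     # 40 = lcm of the pattern periods, so each guesser's score is a 40-term lookup sum.
--     cnt = {}
--     for i, a in enumerate(answers):
--         k = (i % 40, a)
--         cnt[k] = cnt.get(k, 0) + 1
--     scores = [sum(cnt.get((r, p[r % len(p)]), 0) for r in range(40)) for p in pats]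
--     best = max(scores)
--     return [g + 1 for g, s in enumerate(scores) if s == best]
-- ===== Notes on version B (the rewrite author's own statement) =====
-- stated objective: alternative
-- what changed: B replaces A's ceil-tiled answer lists and per-question three-way comparison loop by a histogram: one pass buckets the answers by (index mod 40, value) into a dict (40 = lcm of the pattern periods), and each guesser's score is then a 40-term lookup sum over that histogram, never touching answers again; winners are picked by an index comprehension instead of A's if/append chain.
import Mathlib
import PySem

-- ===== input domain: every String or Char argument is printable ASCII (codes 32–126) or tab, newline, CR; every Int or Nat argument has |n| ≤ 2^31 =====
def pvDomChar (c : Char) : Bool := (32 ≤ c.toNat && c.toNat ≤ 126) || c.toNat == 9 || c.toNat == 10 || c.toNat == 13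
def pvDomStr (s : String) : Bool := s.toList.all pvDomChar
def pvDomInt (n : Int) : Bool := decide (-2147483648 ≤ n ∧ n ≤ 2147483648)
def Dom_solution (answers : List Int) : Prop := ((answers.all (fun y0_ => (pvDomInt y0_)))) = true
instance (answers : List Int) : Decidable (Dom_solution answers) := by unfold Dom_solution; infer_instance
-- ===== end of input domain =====

-- B replaces A's tiled answer lists and per-question comparison loop by a histogram keyed by
-- (index mod 40, value); each score is then a 40-term lookup sum over it (alternative algorithm).

-- ===== PORT A =====
-- math.ceil(n/k) on a list length n is exact ceiling division (n+k-1)/k here (float division is exact at these sizes).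
-- Every pyGetD index below is in range (the loser lists have length ≥ n), so the default 0 is never used.
def solution (answers : List Int) : List Int :=
  let n : Nat := answers.length
  let loser1 := PySem.List.pyRepeat ([1, 2, 3, 4, 5] : List Int) (((n + 4) / 5 : Nat) : Int)
  let loser2 := PySem.List.pyRepeat ([2, 1, 2, 3, 2, 4, 2, 5] : List Int) (((n + 7) / 8 : Nat) : Int)
  let loser3 := PySem.List.pyRepeat ([3, 3, 1, 1, 2, 2, 4, 4, 5, 5] : List Int) (((n + 9) / 10 : Nat) : Int)
  let s :=
    (PySem.List.pyRange 0 (n : Int) 1).foldl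
      (fun (s : Int × Int × Int) i =>
        (if PySem.List.pyGetD loser1 i 0 = PySem.List.pyGetD answers i 0 then s.1 + 1 else s.1,
         if PySem.List.pyGetD loser2 i 0 = PySem.List.pyGetD answers i 0 then s.2.1 + 1 else s.2.1,
         if PySem.List.pyGetD loser3 i 0 = PySem.List.pyGetD answers i 0 then s.2.2 + 1 else s.2.2))
      (0, 0, 0)
  let losersScore : List Int := [s.1, s.2.1, s.2.2]
  let highest := (PySem.List.max? losersScore (fun x => x)).getD 0  -- the list is nonempty, so max? is some
  let w : List Int := []
  let w := if s.1 = highest then w ++ [1] else w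
  let w := if s.2.1 = highest then w ++ [2] else w
  let w := if s.2.2 = highest then w ++ [3] else w
  w

-- ===== PORT B =====
def solution_alt (answers : List Int) : List Int :=
  let pats : List (List Int) :=
    [[1, 2, 3, 4, 5], [2, 1, 2, 3, 2, 4, 2, 5], [3, 3, 1, 1, 2, 2, 4, 4, 5, 5]]
  -- for i, a in enumerate(answers): k = (i % 40, a); cnt[k] = cnt.get(k, 0) + 1
  let cnt := (PySem.List.enumerate answers 0).foldl
      (fun (d : PySem.Dict (Int × Int) Int) p =>
        let k := (PySem.Int.mod p.1 40, p.2)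
        d.insert k (d.getD k 0 + 1))
      PySem.Dict.empty
  -- sum(cnt.get((r, p[r % len(p)]), 0) for r in range(40))
  let scores := pats.map (fun p =>
      ((PySem.List.pyRange 0 40 1).map
        (fun r => cnt.getD (r, PySem.List.pyGetD p (PySem.Int.mod r (p.length : Int)) 0) 0)).sum)
  let best := (PySem.List.max? scores (fun x => x)).getD 0  -- the list is nonempty, so max? is some
  ((PySem.List.enumerate scores 0).filter (fun q => q.2 == best)).map (fun q => q.1 + 1)

-- ===== PRECONDITION & SPEC =====
def Spec_solution (answers : List Int) (out : List Int) : Prop := out = solution_alt answers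
instance (answers : List Int) (out : List Int) : Decidable (Spec_solution answers out) := by
  unfold Spec_solution; infer_instance

-- ===== CLAIM (what is proved, stated in full; the proofs are below) =====
def Claim_equal_solution : Prop := ∀ (answers : List Int), Dom_solution answers → Spec_solution answers (solution answers)

-- ===== LEMMAS AND PROOFS =====

-- indexing into a repeated list is modular indexing into the base pattern (Nat level)
theorem flatten_replicate_getD (pat : List Int) (m : Nat) :
    ∀ k : Nat, k < m * pat.length →
      (List.replicate m pat).flatten.getD k 0 = pat.getD (k % pat.length) 0 := by
  induction m with
  | zero => intro k hk; simp at hk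
  | succ m ih =>
    intro k hk
    have hL : 0 < pat.length := by by_contra h; simp [Nat.eq_zero_of_not_pos h] at hk
    rw [List.replicate_succ, List.flatten_cons]
    by_cases hkL : k < pat.length
    · rw [List.getD_eq_getElem?_getD, List.getElem?_append_left hkL,
        ← List.getD_eq_getElem?_getD, Nat.mod_eq_of_lt hkL]
    · have hge : pat.length ≤ k := Nat.le_of_not_lt hkL
      rw [List.getD_eq_getElem?_getD, List.getElem?_append_right hge,
        ← List.getD_eq_getElem?_getD,
        ih (k - pat.length) (by have h2 : (m + 1) * pat.length = m * pat.length + pat.length := Nat.succ_mul m pat.length; omega),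
        Nat.mod_eq_sub_mod hge]

theorem pyGetD_pyRepeat (pat : List Int) (m : Nat) (i : Int)
    (h0 : 0 ≤ i) (hi : i < (m : Int) * pat.length) :
    PySem.List.pyGetD (PySem.List.pyRepeat pat (m : Int)) i 0 =
      PySem.List.pyGetD pat (PySem.Int.mod i (pat.length : Int)) 0 := by
  have hL : 0 < pat.length := by
    rcases Nat.eq_zero_or_pos pat.length with h | h
    · simp [h] at hi; omega
    · exact h
  obtain ⟨k, rfl⟩ := Int.eq_ofNat_of_zero_le h0
  have hk : k < m * pat.length := by exact_mod_cast hi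
  rw [PySem.Int.mod_eq_emod_of_pos (by exact_mod_cast hL)]
  rw [show ((k : Int) % (pat.length : Int)) = ((k % pat.length : Nat) : Int) from
      (Int.natCast_mod k pat.length).symm, PySem.List.pyGetD_natCast, PySem.List.pyGetD_natCast]
  simpa [PySem.List.pyRepeat] using flatten_replicate_getD pat m k hk

-- enumerate(xs) is zip(range(len(xs)), xs)
theorem enumerate_eq_zip (xs : List Int) :
    ∀ s : Int, PySem.List.enumerate xs s = (PySem.List.pyRange s (s + xs.length) 1).zip xs := by
  induction xs with
  | nil =>
    intro s
    rw [PySem.List.enumerate_nil, PySem.List.pyRange_one_eq_nil (by simp), List.zip_nil_left]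
  | cons x t ih =>
    intro s
    have hb : s + ((x :: t).length : Int) = (s + 1) + (t.length : Int) := by
      simp only [List.length_cons]; push_cast; ring
    rw [hb, PySem.List.enumerate_cons, PySem.List.pyRange_one_cons (by omega),
      List.zip_cons_cons, ih (s + 1)]

-- enumerate(xs) as a map over the index range
theorem enumerate_eq_map (xs : List Int) :
    PySem.List.enumerate xs 0 =
      (PySem.List.pyRange 0 (xs.length : Int) 1).map
        (fun i => (i, PySem.List.pyGetD xs i 0)) := by
  have hz := enumerate_eq_zip xs 0
  rw [zero_add] at hz
  rw [hz]
  apply List.ext_getElem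
  · simp [PySem.List.length_pyRange_one]
  · intro k h1 h2
    have hk : k < xs.length := by
      simpa [PySem.List.length_pyRange_one] using h1
    simp [List.getElem_zip, PySem.List.getElem_pyRange_one, PySem.List.pyGetD_natCast,
      List.getD_eq_getElem?_getD, List.getElem?_eq_getElem hk]

-- A's counting loop (one pattern) equals a countP over the index range
theorem aScore_eq_countP (pat : List Int) (xs : List Int) (m : Nat)
    (hm : xs.length ≤ m * pat.length) :
    (PySem.List.pyRange 0 (xs.length : Int) 1).foldl
        (fun acc i =>
          if PySem.List.pyGetD (PySem.List.pyRepeat pat (m : Int)) i 0 =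
              PySem.List.pyGetD xs i 0 then acc + 1 else acc) 0 =
      ((PySem.List.pyRange 0 (xs.length : Int) 1).countP
        (fun i => PySem.List.pyGetD pat (PySem.Int.mod i (pat.length : Int)) 0 ==
          PySem.List.pyGetD xs i 0) : Int) := by
  have hcong := PySem.List.foldl_congr_mem
      (l := PySem.List.pyRange 0 (xs.length : Int) 1) (init := (0 : Int))
      (f := fun acc i =>
        if PySem.List.pyGetD (PySem.List.pyRepeat pat (m : Int)) i 0 =
            PySem.List.pyGetD xs i 0 then acc + 1 else acc)
      (g := fun acc i =>
        if PySem.List.pyGetD pat (PySem.Int.mod i (pat.length : Int)) 0 =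
            PySem.List.pyGetD xs i 0 then acc + 1 else acc)
      (by
        intro acc i hi
        rw [PySem.List.mem_pyRange_one] at hi
        have hlt : i < (m : Int) * (pat.length : Int) := by
          have h2 : (xs.length : Int) ≤ (m : Int) * (pat.length : Int) := by exact_mod_cast hm
          omega
        simp only [pyGetD_pyRepeat pat m i hi.1 hlt])
  rw [hcong, PySem.List.foldl_ite_add_one, zero_add]
  norm_cast

-- a 0/1 sum over a nodup list containing q.1 exactly once picks out the single matching term
theorem sum_ite_pair (f : Int → Int) (q : Int × Int) :
    ∀ rs : List Int, rs.Nodup → q.1 ∈ rs →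
      (rs.map (fun r => if (r, f r) = q then (1 : Nat) else 0)).sum =
        if q.2 = f q.1 then 1 else 0 := by
  intro rs
  induction rs with
  | nil => intro _ h; simp at h
  | cons r t ih =>
    intro hnd hmem
    have hnd' := List.nodup_cons.mp hnd
    rw [List.map_cons, List.sum_cons]
    by_cases hr : r = q.1
    · subst hr
      have hzero : (t.map (fun r => if (r, f r) = q then (1 : Nat) else 0)).sum = 0 := by
        rw [List.sum_eq_zero]
        intro x hx
        obtain ⟨r', hr', rfl⟩ := List.mem_map.mp hx
        have : ¬ (r', f r') = q := by
          rintro rfl; exact hnd'.1 hr'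
        simp [this]
      rw [hzero]
      rcases q with ⟨q1, q2⟩
      by_cases hq : q2 = f q1 <;> simp [Prod.ext_iff, hq, eq_comm]
    · have hmem' : q.1 ∈ t := by
        rcases List.mem_cons.mp hmem with h | h
        · exact absurd h.symm hr
        · exact h
      have hh : ¬ (r, f r) = q := by
        rintro rfl; exact hr rfl
      rw [ih hnd'.2 hmem', if_neg hh, Nat.zero_add]

-- summing per-bucket counts over all buckets is a single countP
theorem sum_count_eq_countP (f : Int → Int) (rs : List Int) (hnd : rs.Nodup) :
    ∀ ml : List (Int × Int), (∀ q ∈ ml, q.1 ∈ rs) →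
      (rs.map (fun r => ml.count (r, f r))).sum =
        ml.countP (fun q => q.2 == f q.1) := by
  intro ml
  induction ml with
  | nil => intro _; simp
  | cons q t ih =>
    intro hall
    have ht := ih (fun x hx => hall x (List.mem_cons_of_mem q hx))
    have hsplit :
        (rs.map (fun r => (q :: t).count (r, f r))).sum =
          (rs.map (fun r => t.count (r, f r))).sum +
            (rs.map (fun r => if (r, f r) = q then (1 : Nat) else 0)).sum := by
      rw [← List.sum_map_add]
      refine congrArg List.sum (List.map_congr_left fun r _ => ?_)
      rw [List.count_cons]
      by_cases h : q = (r, f r)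
      · simp [h]
      · have h' : ¬(r, f r) = q := fun hh => h hh.symm
        simp [h, h']
    rw [hsplit, ht, sum_ite_pair f q rs hnd (hall q List.mem_cons_self),
      List.countP_cons]
    by_cases h : q.2 = f q.1 <;> simp [h]

-- B's histogram lookup: the dict built by the counting loop holds bucket counts
theorem cnt_getD (answers : List Int) (k : Int × Int) :
    ((PySem.List.enumerate answers 0).foldl
        (fun (d : PySem.Dict (Int × Int) Int) p =>
          let kk := (PySem.Int.mod p.1 40, p.2)
          d.insert kk (d.getD kk 0 + 1))
        PySem.Dict.empty).getD k 0 =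
      (((PySem.List.enumerate answers 0).map
          (fun p => (PySem.Int.mod p.1 40, p.2))).count k : Int) := by
  have hfe : ∀ (l : List (Int × Int)) (d : PySem.Dict (Int × Int) Int),
      l.foldl
        (fun (d : PySem.Dict (Int × Int) Int) p =>
          let kk := (PySem.Int.mod p.1 40, p.2)
          d.insert kk (d.getD kk 0 + 1)) d =
      (l.map (fun q : Int × Int => (PySem.Int.mod q.1 40, q.2))).foldl
        (fun (d : PySem.Dict (Int × Int) Int) kk => d.insert kk (d.getD kk 0 + 1)) d := by
    intro l
    induction l with
    | nil => intro d; rfl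
    | cons x t ih =>
      intro d
      simp only [List.foldl_cons, List.map_cons]
      exact ih _
  rw [hfe, PySem.Dict.getD_foldl_insert_add_one, PySem.Dict.getD_empty, zero_add]

-- the two inner moduli compose: L ∣ 40 ⇒ (i % 40) % L = i % L
theorem mod_mod_40 (i : Int) (L : Nat) (hL : 0 < L) (hdvd : (L : Int) ∣ 40) :
    PySem.Int.mod (PySem.Int.mod i 40) (L : Int) = PySem.Int.mod i (L : Int) := by
  have h40 : (0 : Int) < 40 := by norm_num
  have hLi : (0 : Int) < (L : Int) := by exact_mod_cast hL
  rw [PySem.Int.mod_eq_emod_of_pos h40, PySem.Int.mod_eq_emod_of_pos hLi,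
    PySem.Int.mod_eq_emod_of_pos hLi, Int.emod_emod_of_dvd i hdvd]

-- B's per-pattern histogram sum equals A's countP over the index range
theorem bScore_eq_countP (pat : List Int) (answers : List Int)
    (hL : 0 < pat.length) (hdvd : ((pat.length : Int)) ∣ 40) :
    ((PySem.List.pyRange 0 40 1).map
        (fun r =>
          ((PySem.List.enumerate answers 0).foldl
              (fun (d : PySem.Dict (Int × Int) Int) p =>
                let kk := (PySem.Int.mod p.1 40, p.2)
                d.insert kk (d.getD kk 0 + 1))
              PySem.Dict.empty).getD
            (r, PySem.List.pyGetD pat (PySem.Int.mod r (pat.length : Int)) 0) 0)).sum =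
      ((PySem.List.pyRange 0 (answers.length : Int) 1).countP
        (fun i => PySem.List.pyGetD pat (PySem.Int.mod i (pat.length : Int)) 0 ==
          PySem.List.pyGetD answers i 0) : Int) := by
  set ml := (PySem.List.enumerate answers 0).map (fun p => (PySem.Int.mod p.1 40, p.2)) with hml
  have hstep1 :
      ((PySem.List.pyRange 0 40 1).map
        (fun r =>
          ((PySem.List.enumerate answers 0).foldl
              (fun (d : PySem.Dict (Int × Int) Int) p =>
                let kk := (PySem.Int.mod p.1 40, p.2)
                d.insert kk (d.getD kk 0 + 1))
              PySem.Dict.empty).getD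
            (r, PySem.List.pyGetD pat (PySem.Int.mod r (pat.length : Int)) 0) 0)).sum =
      ((PySem.List.pyRange 0 40 1).map
        (fun r => (ml.count (r, PySem.List.pyGetD pat (PySem.Int.mod r (pat.length : Int)) 0) : Int))).sum := by
    refine congrArg List.sum (List.map_congr_left fun r _ => ?_)
    exact cnt_getD answers _
  rw [hstep1]
  have hall : ∀ q ∈ ml, q.1 ∈ PySem.List.pyRange 0 40 1 := by
    intro q hq
    obtain ⟨p, _, rfl⟩ := List.mem_map.mp hq
    rw [PySem.List.mem_pyRange_one, PySem.Int.mod_eq_emod_of_pos (by norm_num : (0:Int) < 40)]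
    exact ⟨Int.emod_nonneg p.1 (by norm_num), Int.emod_lt_of_pos p.1 (by norm_num)⟩
  have hnat := sum_count_eq_countP
      (fun r => PySem.List.pyGetD pat (PySem.Int.mod r (pat.length : Int)) 0)
      (PySem.List.pyRange 0 40 1) (PySem.List.nodup_pyRange_one 0 40) ml hall
  have hcast :
      ((PySem.List.pyRange 0 40 1).map
        (fun r => (ml.count (r, PySem.List.pyGetD pat (PySem.Int.mod r (pat.length : Int)) 0) : Int))).sum =
      ((ml.countP (fun q => q.2 ==
          PySem.List.pyGetD pat (PySem.Int.mod q.1 (pat.length : Int)) 0)) : Int) := by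
    rw [← hnat, Nat.cast_list_sum, List.map_map]
    rfl
  rw [hcast, hml, List.countP_map]
  have hpred :
      ((fun q : Int × Int => q.2 ==
          PySem.List.pyGetD pat (PySem.Int.mod q.1 (pat.length : Int)) 0) ∘
        (fun p : Int × Int => (PySem.Int.mod p.1 40, p.2))) =
      (fun p : Int × Int => PySem.List.pyGetD pat (PySem.Int.mod p.1 (pat.length : Int)) 0 == p.2) := by
    funext p
    simp only [Function.comp]
    rw [mod_mod_40 p.1 pat.length hL hdvd]
    simp [eq_comm]
  rw [hpred, enumerate_eq_map, List.countP_map]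
  rfl

-- selecting the winners: A's if/append chain equals B's filter/map comprehension
theorem final_shape (c1 c2 c3 best : Int) :
    (let w : List Int := []
     let w := if c1 = best then w ++ [1] else w
     let w := if c2 = best then w ++ [2] else w
     let w := if c3 = best then w ++ [3] else w
     w) =
      ((PySem.List.enumerate [c1, c2, c3] 0).filter
          (fun p => p.2 == best)).map
        (fun p => p.1 + 1) := by
  simp only [PySem.List.enumerate_cons, PySem.List.enumerate_nil, List.filter_cons,
    List.filter_nil, beq_iff_eq]
  split_ifs <;> simp_all

-- ===== VERDICT (by name: the statement is the Claim_ definition above) =====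
theorem solution_spec : Claim_equal_solution := by
  intro answers _
  unfold Spec_solution solution solution_alt
  simp only []
  rw [PySem.List.foldl_prod_mk
      (f := fun acc i =>
        if PySem.List.pyGetD (PySem.List.pyRepeat ([1,2,3,4,5] : List Int)
            (((answers.length + 4) / 5 : Nat) : Int)) i 0 =
            PySem.List.pyGetD answers i 0 then acc + 1 else acc)
      (g := fun (s : Int × Int) i =>
        (if PySem.List.pyGetD (PySem.List.pyRepeat ([2,1,2,3,2,4,2,5] : List Int)
            (((answers.length + 7) / 8 : Nat) : Int)) i 0 =
            PySem.List.pyGetD answers i 0 then s.1 + 1 else s.1,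
         if PySem.List.pyGetD (PySem.List.pyRepeat ([3,3,1,1,2,2,4,4,5,5] : List Int)
            (((answers.length + 9) / 10 : Nat) : Int)) i 0 =
            PySem.List.pyGetD answers i 0 then s.2 + 1 else s.2)),
    PySem.List.foldl_prod_mk
      (f := fun acc i =>
        if PySem.List.pyGetD (PySem.List.pyRepeat ([2,1,2,3,2,4,2,5] : List Int)
            (((answers.length + 7) / 8 : Nat) : Int)) i 0 =
            PySem.List.pyGetD answers i 0 then acc + 1 else acc)
      (g := fun acc i =>
        if PySem.List.pyGetD (PySem.List.pyRepeat ([3,3,1,1,2,2,4,4,5,5] : List Int)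
            (((answers.length + 9) / 10 : Nat) : Int)) i 0 =
            PySem.List.pyGetD answers i 0 then acc + 1 else acc)]
  rw [aScore_eq_countP ([1,2,3,4,5] : List Int) answers _ (by simp; omega),
    aScore_eq_countP ([2,1,2,3,2,4,2,5] : List Int) answers _ (by simp; omega),
    aScore_eq_countP ([3,3,1,1,2,2,4,4,5,5] : List Int) answers _ (by simp; omega)]
  rw [List.map_cons, List.map_cons, List.map_cons, List.map_nil,
    bScore_eq_countP ([1,2,3,4,5] : List Int) answers (by simp) (by norm_num),
    bScore_eq_countP ([2,1,2,3,2,4,2,5] : List Int) answers (by simp) (by norm_num),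
    bScore_eq_countP ([3,3,1,1,2,2,4,4,5,5] : List Int) answers (by simp) (by norm_num)]
  exact final_shape _ _ _ _
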